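-- pv_equiv track=rewrite | github.com/vrajeshsh/python-practice | 06. Strings/01. Character Applns/19. Lexicographical Sort.py | stringSort
-- ===== SOURCE A (Python) =====
-- def stringSort(str):
--     sorted_str =""
--
--     for ascii in range(0, 91):
--         char = chr(ascii)
--         for ch in str:
--             # Anchoring the symbols after the digits and to tackle only once below
--             if char=='9' and not ch.isalnum() and ch!= ' ':
--                 sorted_str+= ch
--             if char == ch.upper():
--                 sorted_str+= ch
--     return sorted_str
-- ===== SOURCE B (Python) =====
-- def stringSort(str):
--     # One pass: distribute chars into 91 buckets keyed by ord(ch.upper());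
--     # non-space, non-alnum chars also go to bucket 57 (after the digits).
--     buckets = [[] for _ in range(91)]
--     for ch in str:
--         u = ch.upper()
--         if len(u) == 1 and ord(u) < 91:
--             buckets[ord(u)].append(ch)
--         if not ch.isalnum() and ch != ' ':
--             buckets[57].append(ch)
--     return ''.join(''.join(b) for b in buckets)
-- ===== Notes on version B (the rewrite author's own statement) =====
-- stated objective: faster
-- what changed: Instead of rescanning the whole string once per ASCII code 0..90 (91 passes), B makes a single pass distributing each character into 91 order-preserving buckets keyed by ord(ch.upper()) (symbols additionally into bucket 57) and joins the buckets.
import Mathlib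
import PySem

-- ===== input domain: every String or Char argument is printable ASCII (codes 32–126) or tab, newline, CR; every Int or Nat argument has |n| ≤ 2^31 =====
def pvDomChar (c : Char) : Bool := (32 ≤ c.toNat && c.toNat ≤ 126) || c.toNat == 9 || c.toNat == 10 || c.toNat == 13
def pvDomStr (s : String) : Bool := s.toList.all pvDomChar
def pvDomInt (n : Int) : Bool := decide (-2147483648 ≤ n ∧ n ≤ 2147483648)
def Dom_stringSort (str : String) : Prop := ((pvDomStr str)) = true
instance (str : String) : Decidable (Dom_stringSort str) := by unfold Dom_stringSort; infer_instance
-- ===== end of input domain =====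

-- B replaces A's 91 rescans of the string by one bucket-distributing pass plus a join (faster by an
-- asymptotic factor only if a timing run confirms it; see claim.json).

-- ===== PORT A =====
-- 'ch.upper()' is ported as PySem.Chars.upperChar (exact for chars whose upper() is a single char;
-- on the stated ASCII domain this is every char).
def stringSort (str : String) : String :=
  String.mk <|
    (PySem.List.pyRange 0 91).foldl (fun sorted_str ascii =>
      let char : Char := Char.ofNat ascii.toNat      -- chr(ascii), ascii ∈ [0,91)
      str.toList.foldl (fun sorted_str ch =>
        let sorted_str :=
          if char = '9' ∧ ¬ PySem.Chars.isalnum ch ∧ ch ≠ ' ' then sorted_str ++ [ch]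
          else sorted_str
        if char = PySem.Chars.upperChar ch then sorted_str ++ [ch] else sorted_str)
        sorted_str)
      []

-- ===== PORT B =====
-- Source B's 'len(u) == 1' test is vacuous here: upperChar is always a single char.
def stringSort_alt (str : String) : String :=
  let buckets : List (List Char) := List.replicate 91 []
  let buckets := str.toList.foldl (fun bs ch =>
    let u := PySem.Chars.upperChar ch
    let bs := if u.toNat < 91 then bs.set u.toNat (bs.getD u.toNat [] ++ [ch]) else bs
    if ¬ PySem.Chars.isalnum ch ∧ ch ≠ ' ' then bs.set 57 (bs.getD 57 [] ++ [ch]) else bs)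
    buckets
  String.mk buckets.flatten

-- ===== PRECONDITION & SPEC =====
def Spec_stringSort (str : String) (out : String) : Prop := out = stringSort_alt str
instance (str : String) (out : String) : Decidable (Spec_stringSort str out) := by unfold Spec_stringSort; infer_instance

-- ===== CLAIM (what is proved, stated in full; the proofs are below) =====
def Claim_equal_stringSort : Prop := ∀ (str : String), Dom_stringSort str → Spec_stringSort str (stringSort str)

-- ===== LEMMAS AND PROOFS =====

-- What a single char contributes to bucket k (B's order of appends within one char).
def pvContrib (k : Nat) (ch : Char) : List Char :=
  (if Char.ofNat k = PySem.Chars.upperChar ch then [ch] else []) ++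
  (if k = 57 ∧ ¬ PySem.Chars.isalnum ch ∧ ch ≠ ' ' then [ch] else [])

-- A's order of appends within one char at iteration k.
def pvContribA (k : Nat) (ch : Char) : List Char :=
  (if Char.ofNat k = '9' ∧ ¬ PySem.Chars.isalnum ch ∧ ch ≠ ' ' then [ch] else []) ++
  (if Char.ofNat k = PySem.Chars.upperChar ch then [ch] else [])

-- B's single-pass step.
def pvStep (bs : List (List Char)) (ch : Char) : List (List Char) :=
  let u := PySem.Chars.upperChar ch
  let bs := if u.toNat < 91 then bs.set u.toNat (bs.getD u.toNat [] ++ [ch]) else bs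
  if ¬ PySem.Chars.isalnum ch ∧ ch ≠ ' ' then bs.set 57 (bs.getD 57 [] ++ [ch]) else bs

lemma pvToNat_ofNat_lt91 {k : Nat} (hk : k < 91) : (Char.ofNat k).toNat = k := by
  rw [Char.toNat_ofNat, if_pos (Or.inl (by omega) : Nat.isValidChar k)]

lemma pvOfNat_eq_nine {k : Nat} (h : Char.ofNat k = '9') : k = 57 := by
  have h' := congrArg Char.toNat h
  rw [Char.toNat_ofNat] at h'
  have h9 : ('9' : Char).toNat = 57 := by decide
  split at h' <;> omega

lemma pvUpper_nine_alnum (ch : Char) (h : PySem.Chars.upperChar ch = '9') :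
    PySem.Chars.isalnum ch = true := by
  unfold PySem.Chars.upperChar at h
  by_cases hl : PySem.Chars.islower ch = true
  · exfalso
    rw [if_pos hl] at h
    have hb : 97 ≤ ch.toNat ∧ ch.toNat ≤ 122 := by
      simp only [PySem.Chars.islower, Bool.and_eq_true, decide_eq_true_eq] at hl
      obtain ⟨h1, h2⟩ := hl
      rw [Char.le_def] at h1 h2
      exact ⟨h1, h2⟩
    have hv : (Char.ofNat (ch.toNat - 32)).toNat = ch.toNat - 32 := pvToNat_ofNat_lt91 (by omega)
    rw [h] at hv
    have h9 : ('9' : Char).toNat = 57 := by decide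
    omega
  · rw [if_neg hl] at h
    subst h
    decide

lemma pvContribA_eq (k : Nat) (ch : Char) : pvContribA k ch = pvContrib k ch := by
  unfold pvContribA pvContrib
  by_cases hk : k = 57
  · subst hk
    have h9 : Char.ofNat 57 = '9' := by decide
    by_cases hs : (¬ PySem.Chars.isalnum ch ∧ ch ≠ ' ')
    · have hne : Char.ofNat 57 ≠ PySem.Chars.upperChar ch := by
        rw [h9]; intro hEq
        exact hs.1 (by simp [pvUpper_nine_alnum ch hEq.symm])
      have c1 : Char.ofNat 57 = '9' ∧ ¬ PySem.Chars.isalnum ch ∧ ch ≠ ' ' := ⟨h9, hs⟩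
      have c2 : (57 : Nat) = 57 ∧ ¬ PySem.Chars.isalnum ch ∧ ch ≠ ' ' := ⟨rfl, hs⟩
      rw [if_pos c1, if_pos c2, if_neg hne]
      simp
    · have c1 : ¬ (Char.ofNat 57 = '9' ∧ ¬ PySem.Chars.isalnum ch ∧ ch ≠ ' ') :=
        fun h => hs h.2
      have c2 : ¬ ((57 : Nat) = 57 ∧ ¬ PySem.Chars.isalnum ch ∧ ch ≠ ' ') :=
        fun h => hs h.2
      rw [if_neg c1, if_neg c2]
      simp
  · have c1 : ¬ (Char.ofNat k = '9' ∧ ¬ PySem.Chars.isalnum ch ∧ ch ≠ ' ') :=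
      fun h => hk (pvOfNat_eq_nine h.1)
    have c2 : ¬ (k = 57 ∧ ¬ PySem.Chars.isalnum ch ∧ ch ≠ ' ') := fun h => hk h.1
    rw [if_neg c1, if_neg c2]
    simp

lemma pvGetD_set_self (l : List (List Char)) (i : Nat) (h : i < l.length) (v : List Char) :
    (l.set i v).getD i [] = v := by
  rw [List.getD_eq_getElem _ _ (by simpa using h), List.getElem_set_self]

lemma pvGetD_set_ne (l : List (List Char)) (i j : Nat) (hne : i ≠ j) (hj : j < l.length)
    (v : List Char) : (l.set i v).getD j [] = l.getD j [] := by
  rw [List.getD_eq_getElem _ _ (by simpa using hj), List.getElem_set_ne hne,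
    List.getD_eq_getElem _ _ hj]

lemma pvStep_length (bs : List (List Char)) (ch : Char) : (pvStep bs ch).length = bs.length := by
  unfold pvStep
  dsimp only
  split_ifs <;> simp

lemma pvStep_getD (bs : List (List Char)) (hlen : bs.length = 91) (k : Nat) (hk : k < 91)
    (ch : Char) : (pvStep bs ch).getD k [] = bs.getD k [] ++ pvContrib k ch := by
  unfold pvStep pvContrib
  dsimp only
  by_cases hub : (PySem.Chars.upperChar ch).toNat < 91
  · rw [if_pos hub]
    have hgd2 : ∀ j, j < 91 →
        (bs.set (PySem.Chars.upperChar ch).toNat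
            (bs.getD (PySem.Chars.upperChar ch).toNat [] ++ [ch])).getD j []
          = bs.getD j [] ++ (if Char.ofNat j = PySem.Chars.upperChar ch then [ch] else []) := by
      intro j hj
      by_cases hke : (PySem.Chars.upperChar ch).toNat = j
      · rw [← hke, pvGetD_set_self bs _ (by omega) _, if_pos (Char.ofNat_toNat _)]
      · rw [pvGetD_set_ne bs _ j hke (by omega) _,
          if_neg (fun hEq => hke (by rw [← hEq, pvToNat_ofNat_lt91 hj]))]
        simp
    by_cases hsym : (¬ PySem.Chars.isalnum ch ∧ ch ≠ ' ')
    · rw [if_pos hsym]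
      by_cases hk57 : k = 57
      · subst hk57
        have c2 : (57 : Nat) = 57 ∧ ¬ PySem.Chars.isalnum ch ∧ ch ≠ ' ' := ⟨rfl, hsym⟩
        rw [pvGetD_set_self _ 57 (by simp [hlen]) _, hgd2 57 (by omega), if_pos c2]
        simp
      · have c2 : ¬ (k = 57 ∧ ¬ PySem.Chars.isalnum ch ∧ ch ≠ ' ') := fun h => hk57 h.1
        rw [pvGetD_set_ne _ 57 k (fun h => hk57 h.symm) (by simp [hlen]; omega) _,
          hgd2 k hk, if_neg c2]
        simp
    · have c2 : ¬ (k = 57 ∧ ¬ PySem.Chars.isalnum ch ∧ ch ≠ ' ') := fun h => hsym h.2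
      rw [if_neg hsym, hgd2 k hk, if_neg c2]
      simp
  · rw [if_neg hub]
    have hne : (if Char.ofNat k = PySem.Chars.upperChar ch then [ch] else ([] : List Char)) = [] := by
      rw [if_neg]
      intro hEq
      exact hub (by rw [← hEq, pvToNat_ofNat_lt91 hk]; omega)
    by_cases hsym : (¬ PySem.Chars.isalnum ch ∧ ch ≠ ' ')
    · by_cases hk57 : k = 57
      · subst hk57
        have c2 : (57 : Nat) = 57 ∧ ¬ PySem.Chars.isalnum ch ∧ ch ≠ ' ' := ⟨rfl, hsym⟩
        rw [if_pos hsym, pvGetD_set_self bs 57 (by omega) _, if_pos c2, hne]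
        simp
      · have c2 : ¬ (k = 57 ∧ ¬ PySem.Chars.isalnum ch ∧ ch ≠ ' ') := fun h => hk57 h.1
        rw [if_pos hsym, pvGetD_set_ne bs 57 k (fun h => hk57 h.symm) (by omega) _,
          if_neg c2, hne]
        simp
    · have c2 : ¬ (k = 57 ∧ ¬ PySem.Chars.isalnum ch ∧ ch ≠ ' ') := fun h => hsym h.2
      rw [if_neg hsym, if_neg c2, hne]
      simp

lemma pvFold_length (cs : List Char) (bs : List (List Char)) :
    (cs.foldl pvStep bs).length = bs.length := by
  induction cs generalizing bs with
  | nil => rfl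
  | cons c cs ih => rw [List.foldl_cons, ih, pvStep_length]

lemma pvFold_getD (cs : List Char) (bs : List (List Char)) (hlen : bs.length = 91)
    (k : Nat) (hk : k < 91) :
    (cs.foldl pvStep bs).getD k [] = bs.getD k [] ++ cs.flatMap (pvContrib k) := by
  induction cs generalizing bs with
  | nil => simp
  | cons c cs ih =>
    rw [List.foldl_cons, ih (pvStep bs c) (by rw [pvStep_length, hlen]),
      pvStep_getD bs hlen k hk c]
    simp

lemma pvFlatten_eq (bs : List (List Char)) :
    bs.flatten = (List.range bs.length).flatMap (fun k => bs.getD k []) := by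
  rw [List.flatMap_def]
  congr 1
  apply List.ext_getElem (by simp)
  intro i h1 h2
  simp only [List.getElem_map, List.getElem_range]
  exact (List.getD_eq_getElem _ _ (by simpa using h1)).symm

lemma pvA_eq (str : String) :
    stringSort str =
      String.mk ((List.range 91).flatMap (fun k => str.toList.flatMap (pvContribA k))) := by
  unfold stringSort
  congr 1
  have h91 : (91 : Int) = ((91 : Nat) : Int) := by norm_num
  rw [h91, PySem.List.pyRange_zero_natCast, List.foldl_map]
  have hinner : ∀ (k : Nat) (acc : List Char),
      str.toList.foldl (fun sorted_str ch =>
        let sorted_str :=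
          if Char.ofNat ((k : Int)).toNat = '9' ∧ ¬ PySem.Chars.isalnum ch ∧ ch ≠ ' ' then
            sorted_str ++ [ch]
          else sorted_str
        if Char.ofNat ((k : Int)).toNat = PySem.Chars.upperChar ch then sorted_str ++ [ch]
        else sorted_str) acc
      = acc ++ str.toList.flatMap (pvContribA k) := by
    intro k acc
    rw [PySem.List.foldl_congr_mem _ _ (fun a ch => a ++ pvContribA k ch) _ ?_,
      PySem.List.foldl_append_eq_flatMap]
    intro a x _
    simp only [Int.toNat_natCast]
    unfold pvContribA
    split_ifs <;> simp
  rw [PySem.List.foldl_congr_mem _ _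
      (fun acc k => acc ++ str.toList.flatMap (pvContribA k)) _ (fun a k _ => hinner k a),
    PySem.List.foldl_append_eq_flatMap]
  simp

lemma pvB_eq (str : String) :
    stringSort_alt str =
      String.mk ((List.range 91).flatMap (fun k => str.toList.flatMap (pvContrib k))) := by
  show String.mk (str.toList.foldl pvStep (List.replicate 91 ([] : List Char))).flatten = _
  congr 1
  rw [pvFlatten_eq, pvFold_length]
  simp only [List.length_replicate]
  rw [List.flatMap_def, List.flatMap_def]
  congr 1
  apply List.map_congr_left
  intro k hk
  have hk91 : k < 91 := by simpa using hk
  rw [pvFold_getD _ _ (by simp) k hk91, List.getD_replicate _ hk91]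
  rfl

-- ===== VERDICT (by name: the statement is the Claim_ definition above) =====
theorem stringSort_spec : Claim_equal_stringSort := by
  intro str _
  unfold Spec_stringSort
  rw [pvA_eq, pvB_eq]
  congr 1
  rw [List.flatMap_def, List.flatMap_def]
  congr 1
  apply List.map_congr_left
  intro k _
  rw [List.flatMap_def, List.flatMap_def]
  congr 1
  exact List.map_congr_left (fun ch _ => pvContribA_eq k ch)
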